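-- pv_equiv track=rewrite | github.com/lambadalambda/gitlab-to-forgejo | src/gitlab_to_forgejo/migrator.py | _iter_members_by_level
-- ===== SOURCE A (Python) =====
-- from collections.abc import Iterator, Mapping
--
-- def _iter_members_by_level(
--     members: Mapping[str, int],
-- ) -> tuple[list[str], list[str], list[str], list[str]]:
--     owners: list[str] = []
--     maintainers: list[str] = []
--     developers: list[str] = []
--     reporters: list[str] = []
--
--     for username, lvl in members.items():
--         if lvl >= 50:
--             owners.append(username)
--         elif lvl >= 40:
--             maintainers.append(username)
--         elif lvl >= 30:
--             developers.append(username)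
--         else:
--             reporters.append(username)
--
--     owners.sort()
--     maintainers.sort()
--     developers.sort()
--     reporters.sort()
--     return owners, maintainers, developers, reporters
-- ===== SOURCE B (Python) =====
-- def _iter_members_by_level(members):
--     def band(lvl):
--         if lvl >= 50:
--             return 0
--         if lvl >= 40:
--             return 1
--         if lvl >= 30:
--             return 2
--         return 3
--
--     tagged = sorted((band(lvl), u) for u, lvl in members.items())
--     names = [u for _, u in tagged]
--     i1 = sum(1 for b, _ in tagged if b == 0)
--     i2 = i1 + sum(1 for b, _ in tagged if b == 1)
--     i3 = i2 + sum(1 for b, _ in tagged if b == 2)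
--     return names[:i1], names[i1:i2], names[i2:i3], names[i3:]
-- ===== Notes on version B (the rewrite author's own statement) =====
-- stated objective: alternative
-- what changed: B tags each username with its band index, does ONE sort of the (band, name) pairs by composite key, and reads the four buckets off as contiguous slices at band-count boundaries, instead of A's four-way append partition followed by four separate per-bucket sorts.
import Mathlib
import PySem

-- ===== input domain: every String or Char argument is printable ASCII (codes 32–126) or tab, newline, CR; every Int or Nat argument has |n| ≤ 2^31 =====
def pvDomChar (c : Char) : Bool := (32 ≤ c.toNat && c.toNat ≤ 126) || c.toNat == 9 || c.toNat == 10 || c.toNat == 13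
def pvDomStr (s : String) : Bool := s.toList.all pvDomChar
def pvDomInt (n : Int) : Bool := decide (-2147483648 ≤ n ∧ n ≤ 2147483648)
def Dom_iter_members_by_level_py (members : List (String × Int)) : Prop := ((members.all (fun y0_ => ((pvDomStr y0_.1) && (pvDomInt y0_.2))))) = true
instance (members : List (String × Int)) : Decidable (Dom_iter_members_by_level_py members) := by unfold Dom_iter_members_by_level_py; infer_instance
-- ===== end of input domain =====

-- B sorts ONE tagged list of (band, username) pairs by its composite key and recovers the four
-- buckets as contiguous slices of it (boundaries from band counts), instead of A's four-way
-- append partition followed by four per-bucket sorts (objective: alternative).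

-- ===== PORT A =====
-- A: partition the dict items into four buckets in insertion order, then sort each bucket.
def iter_members_by_level_py (members : List (String × Int)) :
    List String × List String × List String × List String :=
  let s := (PySem.Dict.ofList members).items.foldl
    (fun (acc : List String × List String × List String × List String) p =>
      if p.2 ≥ 50 then (acc.1 ++ [p.1], acc.2.1, acc.2.2.1, acc.2.2.2)
      else if p.2 ≥ 40 then (acc.1, acc.2.1 ++ [p.1], acc.2.2.1, acc.2.2.2)
      else if p.2 ≥ 30 then (acc.1, acc.2.1, acc.2.2.1 ++ [p.1], acc.2.2.2)
      else (acc.1, acc.2.1, acc.2.2.1, acc.2.2.2 ++ [p.1]))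
    ([], [], [], [])
  (PySem.List.sorted s.1 (fun x => x) false,
   PySem.List.sorted s.2.1 (fun x => x) false,
   PySem.List.sorted s.2.2.1 (fun x => x) false,
   PySem.List.sorted s.2.2.2 (fun x => x) false)

-- ===== PORT B =====
-- B's helper band(lvl)
def pvBand (lvl : Int) : Int :=
  if lvl ≥ 50 then 0 else if lvl ≥ 40 then 1 else if lvl ≥ 30 then 2 else 3

-- B: tag each item with its band, sort the tagged pairs once (Python's tuple sort is
-- PySem.List.sorted2 on the two components), then cut the projected name list at the
-- band-count boundaries; sum(1 for … if b == k) is countP (PYSEM: a 0/1-sum IS countP),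
-- names[:i1] / names[i1:i2] / names[i3:] are PySem.List.slice.
def iter_members_by_level_py_alt (members : List (String × Int)) :
    List String × List String × List String × List String :=
  let tagged := PySem.List.sorted2
    ((PySem.Dict.ofList members).items.map (fun p => (pvBand p.2, p.1)))
    Prod.fst Prod.snd false
  let names := tagged.map Prod.snd
  let i1 : Int := (tagged.countP (fun t => t.1 == 0) : Nat)
  let i2 : Int := i1 + (tagged.countP (fun t => t.1 == 1) : Nat)
  let i3 : Int := i2 + (tagged.countP (fun t => t.1 == 2) : Nat)
  (PySem.List.slice names none (some i1),
   PySem.List.slice names (some i1) (some i2),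
   PySem.List.slice names (some i2) (some i3),
   PySem.List.slice names (some i3) none)

-- ===== PRECONDITION & SPEC =====
def Spec_iter_members_by_level_py (members : List (String × Int)) (out : List String × List String × List String × List String) : Prop := out = iter_members_by_level_py_alt members
instance (members : List (String × Int)) (out : List String × List String × List String × List String) : Decidable (Spec_iter_members_by_level_py members out) := by unfold Spec_iter_members_by_level_py; infer_instance

-- ===== CLAIM (what is proved, stated in full; the proofs are below) =====
def Claim_equal_iter_members_by_level_py : Prop := ∀ (members : List (String × Int)), Dom_iter_members_by_level_py members → Spec_iter_members_by_level_py members (iter_members_by_level_py members)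

-- ===== LEMMAS AND PROOFS =====

lemma pvBand_cases (v : Int) : pvBand v = 0 ∨ pvBand v = 1 ∨ pvBand v = 2 ∨ pvBand v = 3 := by
  unfold pvBand; split_ifs <;> simp

-- the four band filters partition the list, up to permutation
lemma filter4_perm (l : List (String × Int)) :
    (l.filter (fun p => pvBand p.2 == 0) ++ l.filter (fun p => pvBand p.2 == 1)
      ++ l.filter (fun p => pvBand p.2 == 2) ++ l.filter (fun p => pvBand p.2 == 3)).Perm l := by
  rw [List.perm_iff_count]
  intro x
  have hz : ∀ (k : Int), pvBand x.2 ≠ k →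
      List.count x (l.filter (fun p => pvBand p.2 == k)) = 0 := by
    intro k hk
    exact List.count_eq_zero.mpr (fun hm => hk (by simpa using (List.mem_filter.mp hm).2))
  simp only [List.count_append]
  rcases pvBand_cases x.2 with h | h | h | h
  · rw [hz 1 (by simp [h]), hz 2 (by simp [h]), hz 3 (by simp [h]),
      List.count_filter (by simp [h])]; omega
  · rw [hz 0 (by simp [h]), hz 2 (by simp [h]), hz 3 (by simp [h]),
      List.count_filter (by simp [h])]; omega
  · rw [hz 0 (by simp [h]), hz 1 (by simp [h]), hz 3 (by simp [h]),
      List.count_filter (by simp [h])]; omega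
  · rw [hz 0 (by simp [h]), hz 1 (by simp [h]), hz 2 (by simp [h]),
      List.count_filter (by simp [h])]; omega

-- proof-only abbreviation: A's k-th bucket (the sorted usernames of band k)
def pvBucket (l : List (String × Int)) (k : Int) : List String :=
  PySem.List.sorted ((l.filter fun p => pvBand p.2 == k).map Prod.fst) (fun x => x) false

lemma pairwise_lt_of_le_nodup (l : List String) (h : l.Pairwise (· ≤ ·)) (hn : l.Nodup) :
    l.Pairwise (· < ·) := by
  induction l with
  | nil => exact List.Pairwise.nil
  | cons a t ih =>
    rw [List.pairwise_cons] at h ⊢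
    rw [List.nodup_cons] at hn
    exact ⟨fun b hb => lt_of_le_of_ne (h.1 b hb) (fun e => hn.1 (e ▸ hb)), ih h.2 hn.2⟩

-- each bucket is strictly increasing (the usernames are distinct dict keys)
lemma pvBucket_pairwise_lt (l : List (String × Int)) (hnd : (l.map Prod.fst).Nodup) (k : Int) :
    (pvBucket l k).Pairwise (· < ·) := by
  have hsub : ((l.filter fun p => pvBand p.2 == k).map Prod.fst).Sublist (l.map Prod.fst) :=
    List.Sublist.map Prod.fst List.filter_sublist
  have hn : (pvBucket l k).Nodup :=
    (PySem.List.sorted_perm _ _ _).symm.nodup (hsub.nodup hnd)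
  exact pairwise_lt_of_le_nodup _ (PySem.List.sorted_pairwise _ _) hn

-- the tagged bucket is a permutation of the filtered tagged items
lemma tagged_bucket_perm (l : List (String × Int)) (k : Int) :
    (((pvBucket l k).map (fun u => (k, u))) : List (Int × String)).Perm
      ((l.filter fun p => pvBand p.2 == k).map (fun p => (pvBand p.2, p.1))) := by
  have h1 : (pvBucket l k).Perm ((l.filter fun p => pvBand p.2 == k).map Prod.fst) :=
    PySem.List.sorted_perm _ _ _
  have h2 := h1.map (fun u => ((k : Int), u))
  have h3 : ((l.filter fun p => pvBand p.2 == k).map Prod.fst).map (fun u => ((k : Int), u))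
      = (l.filter fun p => pvBand p.2 == k).map (fun p => (pvBand p.2, p.1)) := by
    rw [List.map_map]
    exact List.map_congr_left (fun p hp => by
      have : pvBand p.2 = k := by simpa using (List.mem_filter.mp hp).2
      simp [this])
  rw [h3] at h2
  exact h2

-- the lex-sorted tagged list is the concatenation of the four tagged buckets
lemma tagged_eq (l : List (String × Int)) (hnd : (l.map Prod.fst).Nodup) :
    PySem.List.sorted (l.map (fun p => (pvBand p.2, p.1)))
        (fun x => (toLex (x.1, x.2) : Int ×ₗ String)) false
      = (pvBucket l 0).map (fun u => ((0 : Int), u))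
        ++ (pvBucket l 1).map (fun u => ((1 : Int), u))
        ++ (pvBucket l 2).map (fun u => ((2 : Int), u))
        ++ (pvBucket l 3).map (fun u => ((3 : Int), u)) := by
  apply PySem.List.sorted_eq_of_perm_of_pairwise_lt
  · -- permutation
    have hmap := (filter4_perm l).map (fun p => (pvBand p.2, p.1))
    simp only [List.map_append] at hmap
    exact (((((tagged_bucket_perm l 0).append (tagged_bucket_perm l 1)).append
      (tagged_bucket_perm l 2)).append (tagged_bucket_perm l 3)).trans hmap)
  · -- strictly increasing in the lexicographic key
    have hblock : ∀ k : Int, ((pvBucket l k).map (fun u => (k, u))).Pairwise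
        (fun a b : Int × String => (toLex (a.1, a.2) : Int ×ₗ String) < toLex (b.1, b.2)) := by
      intro k
      rw [List.pairwise_map]
      exact (pvBucket_pairwise_lt l hnd k).imp (fun h => by
        simp [Prod.Lex.lt_iff, h])
    have hcross : ∀ (j k : Int), j < k → ∀ a ∈ (pvBucket l j).map (fun u => (j, u)),
        ∀ b ∈ (pvBucket l k).map (fun u => (k, u)),
        (toLex (a.1, a.2) : Int ×ₗ String) < toLex (b.1, b.2) := by
      intro j k hjk a ha b hb
      obtain ⟨ua, _, rfl⟩ := List.mem_map.mp ha
      obtain ⟨ub, _, rfl⟩ := List.mem_map.mp hb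
      simp [Prod.Lex.lt_iff, hjk]
    rw [List.pairwise_append, List.pairwise_append, List.pairwise_append]
    refine ⟨⟨⟨hblock 0, hblock 1, fun a ha b hb => hcross 0 1 (by norm_num) a ha b hb⟩,
      hblock 2, ?_⟩, hblock 3, ?_⟩
    · intro a ha b hb
      rcases List.mem_append.mp ha with h | h
      · exact hcross 0 2 (by norm_num) a h b hb
      · exact hcross 1 2 (by norm_num) a h b hb
    · intro a ha b hb
      rcases List.mem_append.mp ha with h | h
      · rcases List.mem_append.mp h with h' | h'
        · exact hcross 0 3 (by norm_num) a h' b hb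
        · exact hcross 1 3 (by norm_num) a h' b hb
      · exact hcross 2 3 (by norm_num) a h b hb

-- A's fold: the four buckets are the item list filtered by band, usernames projected out
lemma foldA_eq (l : List (String × Int)) (o m d r : List String) :
    l.foldl
      (fun (acc : List String × List String × List String × List String) p =>
        if p.2 ≥ 50 then (acc.1 ++ [p.1], acc.2.1, acc.2.2.1, acc.2.2.2)
        else if p.2 ≥ 40 then (acc.1, acc.2.1 ++ [p.1], acc.2.2.1, acc.2.2.2)
        else if p.2 ≥ 30 then (acc.1, acc.2.1, acc.2.2.1 ++ [p.1], acc.2.2.2)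
        else (acc.1, acc.2.1, acc.2.2.1, acc.2.2.2 ++ [p.1]))
      (o, m, d, r) =
    (o ++ ((l.filter fun p => pvBand p.2 == 0).map Prod.fst),
     m ++ ((l.filter fun p => pvBand p.2 == 1).map Prod.fst),
     d ++ ((l.filter fun p => pvBand p.2 == 2).map Prod.fst),
     r ++ ((l.filter fun p => pvBand p.2 == 3).map Prod.fst)) := by
  induction l generalizing o m d r with
  | nil => simp
  | cons p t ih =>
    rcases le_or_gt 50 p.2 with h1 | h1
    · simp [ih, h1, pvBand]
    · rcases le_or_gt 40 p.2 with h2 | h2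
      · simp [ih, h2, pvBand, not_le.mpr h1]
      · rcases le_or_gt 30 p.2 with h3 | h3
        · simp [ih, h3, pvBand, not_le.mpr h1, not_le.mpr h2]
        · simp [ih, pvBand, not_le.mpr h1, not_le.mpr h2, not_le.mpr h3]

-- Python's tuple sort (sorted2 on the two components) is a sort by the lexicographic key
lemma sorted2_eq_sorted_lex {α κ₁ κ₂ : Type} [LinearOrder κ₁] [LinearOrder κ₂]
    (xs : List α) (k1 : α → κ₁) (k2 : α → κ₂) :
    PySem.List.sorted2 xs k1 k2 false
      = PySem.List.sorted xs (fun x => (toLex (k1 x, k2 x) : κ₁ ×ₗ κ₂)) false := by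
  have hb : (fun a b => decide (k1 a < k1 b) || (!decide (k1 b < k1 a) && decide (k2 a < k2 b)))
      = (fun a b : α => decide ((toLex (k1 a, k2 a) : κ₁ ×ₗ κ₂) < toLex (k1 b, k2 b))) := by
    funext a b
    rcases lt_trichotomy (k1 a) (k1 b) with h | h | h
    · simp [h, Prod.Lex.lt_iff]
    · simp [h, Prod.Lex.lt_iff]
    · simp [not_lt.mpr (le_of_lt h), h, Prod.Lex.lt_iff, ne_of_gt h]
  simp only [PySem.List.sorted2, PySem.List.sorted, Bool.false_eq_true, if_false, hb]

-- slicing an append at block boundaries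
lemma slice_block_first {α : Type} (x r : List α) :
    PySem.List.slice (x ++ r) none (some ((x.length : Nat) : Int)) = x := by
  rw [PySem.List.slice_to_natCast, List.take_left]

lemma slice_block_mid {α : Type} (x y z : List α) :
    PySem.List.slice (x ++ y ++ z) (some ((x.length : Nat) : Int))
      (some (((x.length : Nat) : Int) + ((y.length : Nat) : Int))) = y := by
  have h : ((x.length : Int) + (y.length : Int)) = (((x.length + y.length : Nat) : Nat) : Int) := by
    push_cast; ring
  rw [h, PySem.List.slice_natCast, List.append_assoc, List.drop_left]
  simp

lemma slice_block_last {α : Type} (x r : List α) :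
    PySem.List.slice (x ++ r) (some ((x.length : Nat) : Int)) none = r := by
  rw [PySem.List.slice_from_natCast, List.drop_left]

-- ===== VERDICT (by name: the statement is the Claim_ definition above) =====
theorem iter_members_by_level_py_spec : Claim_equal_iter_members_by_level_py := by
  intro members _
  unfold Spec_iter_members_by_level_py
  unfold iter_members_by_level_py iter_members_by_level_py_alt
  dsimp only
  have hnd : ((PySem.Dict.ofList members).items.map Prod.fst).Nodup :=
    PySem.Dict.nodup_keys_ofList members
  set l := (PySem.Dict.ofList members).items with hl
  rw [foldA_eq]
  rw [sorted2_eq_sorted_lex]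
  rw [tagged_eq l hnd]
  set b0 := pvBucket l 0
  set b1 := pvBucket l 1
  set b2 := pvBucket l 2
  set b3 := pvBucket l 3
  have hnames : ((b0.map (fun u => ((0:Int), u)) ++ b1.map (fun u => ((1:Int), u))
      ++ b2.map (fun u => ((2:Int), u)) ++ b3.map (fun u => ((3:Int), u))).map Prod.snd)
      = b0 ++ b1 ++ b2 ++ b3 := by
    simp [List.map_map]
  have hc : ∀ (j k : Int) (b : List String),
      (b.map (fun u => (j, u))).countP (fun t => t.1 == k) = if j = k then b.length else 0 := by
    intro j k b
    rw [List.countP_map]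
    by_cases h : j = k
    · simp [h, Function.comp, List.countP_eq_length]
    · simp [Function.comp, h, List.countP_eq_zero]
  have hc0 : ((b0.map (fun u => ((0:Int), u)) ++ b1.map (fun u => ((1:Int), u))
      ++ b2.map (fun u => ((2:Int), u)) ++ b3.map (fun u => ((3:Int), u))).countP
        (fun t => t.1 == 0)) = b0.length := by
    simp [List.countP_append, hc]
  have hc1 : ((b0.map (fun u => ((0:Int), u)) ++ b1.map (fun u => ((1:Int), u))
      ++ b2.map (fun u => ((2:Int), u)) ++ b3.map (fun u => ((3:Int), u))).countP
        (fun t => t.1 == 1)) = b1.length := by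
    simp [List.countP_append, hc]
  have hc2 : ((b0.map (fun u => ((0:Int), u)) ++ b1.map (fun u => ((1:Int), u))
      ++ b2.map (fun u => ((2:Int), u)) ++ b3.map (fun u => ((3:Int), u))).countP
        (fun t => t.1 == 2)) = b2.length := by
    simp [List.countP_append, hc]
  rw [hnames, hc0, hc1, hc2]
  refine Prod.ext ?_ (Prod.ext ?_ (Prod.ext ?_ ?_))
  · show b0 = _
    rw [List.append_assoc, List.append_assoc]
    exact (slice_block_first b0 (b1 ++ (b2 ++ b3))).symm
  · show b1 = _
    rw [List.append_assoc (b0 ++ b1) b2 b3]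
    exact (slice_block_mid b0 b1 (b2 ++ b3)).symm
  · show b2 = _
    have e1 : ((b0.length : Int) + (b1.length : Int)) = (((b0 ++ b1).length : Nat) : Int) := by
      push_cast [List.length_append]; ring
    rw [e1]
    exact (slice_block_mid (b0 ++ b1) b2 b3).symm
  · show b3 = _
    have e2 : ((b0.length : Int) + (b1.length : Int) + (b2.length : Int))
        = ((((b0 ++ b1) ++ b2).length : Nat) : Int) := by
      push_cast [List.length_append]; ring
    rw [e2]
    exact (slice_block_last ((b0 ++ b1) ++ b2) b3).symm
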